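-- pv_equiv track=rewrite | github.com/tomu1969/pai-personal-ai | mortgage-agent/src/simple_api.py | determine_expected_field
-- ===== SOURCE A (Python) =====
-- from typing import Optional, Dict, Any, List
--
-- def determine_expected_field(messages: List[Dict[str, str]]) -> str:
--     """
--     Determine what field the user was likely trying to provide based on conversation context.
--     """
--     if not messages:
--         return "unknown"
--
--     # Get the last assistant message to understand what was being asked
--     assistant_messages = [m for m in messages if m["role"] == "assistant"]
--     if not assistant_messages:
--         return "unknown"
--
--     last_assistant_msg = assistant_messages[-1]["content"].lower()
--
--     # Pattern matching to determine expected field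
--     if any(phrase in last_assistant_msg for phrase in ["down payment", "put down", "how much can you"]):
--         return "down_payment"
--     elif any(phrase in last_assistant_msg for phrase in ["property price", "price you", "cost of"]):
--         return "property_price"
--     elif any(phrase in last_assistant_msg for phrase in ["city", "location", "where is", "property location"]):
--         return "property_location"
--     elif any(phrase in last_assistant_msg for phrase in ["purpose", "property purpose", "use the property"]):
--         return "loan_purpose"
--     elif any(phrase in last_assistant_msg for phrase in ["passport", "valid passport"]):
--         return "passport"
--     elif any(phrase in last_assistant_msg for phrase in ["visa", "u.s. visa", "visa status"]):
--         return "visa"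
--     elif any(phrase in last_assistant_msg for phrase in ["income", "documentation", "demonstrate income"]):
--         return "income_documentation"
--     elif any(phrase in last_assistant_msg for phrase in ["reserves", "saved", "payments saved"]):
--         return "reserves"
--     else:
--         return "unknown"
-- ===== SOURCE B (Python) =====
-- from typing import Optional, Dict, Any, List
--
-- FIELD_PATTERNS = [
--     ("down_payment", ["down payment", "put down", "how much can you"]),
--     ("property_price", ["property price", "price you", "cost of"]),
--     ("property_location", ["city", "location", "where is", "property location"]),
--     ("loan_purpose", ["purpose", "property purpose", "use the property"]),
--     ("passport", ["passport", "valid passport"]),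
--     ("visa", ["visa", "u.s. visa", "visa status"]),
--     ("income_documentation", ["income", "documentation", "demonstrate income"]),
--     ("reserves", ["reserves", "saved", "payments saved"]),
-- ]
--
-- # flat (priority, phrase) table, ordered by field priority
-- FLAT = [(i, p) for i, (_f, ps) in enumerate(FIELD_PATTERNS) for p in ps]
--
-- def determine_expected_field(messages: List[Dict[str, str]]) -> str:
--     # scan backwards for the last assistant message (early exit)
--     msg = None
--     for m in reversed(messages):
--         if m["role"] == "assistant":
--             msg = m["content"].lower()
--             break
--     if msg is None:
--         return "unknown"
--     # collect every matching phrase's field priority, then take the best one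
--     hits = [i for i, p in FLAT if p in msg]
--     if not hits:
--         return "unknown"
--     return FIELD_PATTERNS[min(hits)][0]
-- ===== Notes on version B (the rewrite author's own statement) =====
-- stated objective: alternative
-- what changed: B scans the messages backwards with early exit instead of filtering all assistant messages and indexing [-1], and replaces the if/elif branch chain by collecting every matching phrase's priority from a flat (priority, phrase) table and returning the field with the minimum priority.
import Mathlib
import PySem

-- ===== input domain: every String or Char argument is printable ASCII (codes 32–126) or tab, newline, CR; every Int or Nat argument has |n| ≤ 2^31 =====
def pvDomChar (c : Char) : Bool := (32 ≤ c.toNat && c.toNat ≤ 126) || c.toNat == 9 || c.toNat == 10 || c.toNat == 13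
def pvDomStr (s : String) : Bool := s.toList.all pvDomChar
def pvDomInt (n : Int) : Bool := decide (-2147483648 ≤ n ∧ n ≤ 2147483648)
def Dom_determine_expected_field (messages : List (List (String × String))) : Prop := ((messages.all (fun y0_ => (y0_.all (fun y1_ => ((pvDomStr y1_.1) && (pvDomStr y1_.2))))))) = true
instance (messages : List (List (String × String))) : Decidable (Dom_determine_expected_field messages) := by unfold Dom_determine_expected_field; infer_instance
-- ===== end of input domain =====

-- B scans messages backwards with early exit (instead of filter + [-1]) and picks the field of
-- minimum priority among all matching phrases of a flat table (instead of an if/elif chain). Alternative, same cost.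

-- ===== PORT A =====
def determine_expected_field (messages : List (List (String × String))) : String :=
  if messages.isEmpty then "unknown" else
  let assistant_messages := messages.filter (fun m => PySem.Dict.getD (PySem.Dict.mk m) "role" "" == "assistant")
  if assistant_messages.isEmpty then "unknown" else
  let last_assistant_msg :=
    PySem.Str.lower (PySem.Dict.getD (PySem.Dict.mk (PySem.List.pyGetD assistant_messages (-1) [])) "content" "")
  if ["down payment", "put down", "how much can you"].any (fun p => PySem.Str.isIn p last_assistant_msg) then "down_payment"
  else if ["property price", "price you", "cost of"].any (fun p => PySem.Str.isIn p last_assistant_msg) then "property_price"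
  else if ["city", "location", "where is", "property location"].any (fun p => PySem.Str.isIn p last_assistant_msg) then "property_location"
  else if ["purpose", "property purpose", "use the property"].any (fun p => PySem.Str.isIn p last_assistant_msg) then "loan_purpose"
  else if ["passport", "valid passport"].any (fun p => PySem.Str.isIn p last_assistant_msg) then "passport"
  else if ["visa", "u.s. visa", "visa status"].any (fun p => PySem.Str.isIn p last_assistant_msg) then "visa"
  else if ["income", "documentation", "demonstrate income"].any (fun p => PySem.Str.isIn p last_assistant_msg) then "income_documentation"
  else if ["reserves", "saved", "payments saved"].any (fun p => PySem.Str.isIn p last_assistant_msg) then "reserves"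
  else "unknown"

-- ===== PORT B =====
def fieldPatterns : List (String × List String) :=
  [("down_payment", ["down payment", "put down", "how much can you"]),
   ("property_price", ["property price", "price you", "cost of"]),
   ("property_location", ["city", "location", "where is", "property location"]),
   ("loan_purpose", ["purpose", "property purpose", "use the property"]),
   ("passport", ["passport", "valid passport"]),
   ("visa", ["visa", "u.s. visa", "visa status"]),
   ("income_documentation", ["income", "documentation", "demonstrate income"]),
   ("reserves", ["reserves", "saved", "payments saved"])]

-- FLAT = [(i, p) for i, (_f, ps) in enumerate(FIELD_PATTERNS) for p in ps]
def flatTable : List (Int × String) :=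
  (PySem.List.enumerate fieldPatterns 0).flatMap (fun ifp => ifp.2.2.map (fun p => (ifp.1, p)))

-- 'for m in reversed(messages): if m["role"] == "assistant": msg = m["content"].lower(); break'
def findAssistantRev : List (List (String × String)) → Option String
  | [] => none
  | m :: rest =>
      if PySem.Dict.getD (PySem.Dict.mk m) "role" "" == "assistant" then
        some (PySem.Str.lower (PySem.Dict.getD (PySem.Dict.mk m) "content" ""))
      else findAssistantRev rest

def determine_expected_field_alt (messages : List (List (String × String))) : String :=
  match findAssistantRev messages.reverse with
  | none => "unknown"
  | some msg =>
      let hits := (flatTable.filter (fun ip => PySem.Str.isIn ip.2 msg)).map (·.1)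
      if hits.isEmpty then "unknown" else
      match PySem.List.min? hits (fun x => x) with
      | none => "unknown"
      | some i => (PySem.List.pyGetD fieldPatterns i ("", [])).1

-- ===== PRECONDITION & SPEC =====
-- Pre_ excludes exactly the inputs where the Python A raises KeyError: some message lacks a
-- "role" key, or the last assistant message lacks a "content" key.
def Pre_determine_expected_field (messages : List (List (String × String))) : Prop :=
  (messages.all (fun m => (PySem.Dict.get? (PySem.Dict.mk m) "role").isSome)) = true ∧
  ∀ last, (messages.filter (fun m => PySem.Dict.getD (PySem.Dict.mk m) "role" "" == "assistant")).getLast? = some last →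
    (PySem.Dict.get? (PySem.Dict.mk last) "content").isSome = true
instance (messages : List (List (String × String))) : Decidable (Pre_determine_expected_field messages) := by
  unfold Pre_determine_expected_field; infer_instance

def pvWitness_determine_expected_field : (List (List (String × String))) :=
  [[("role", "assistant"), ("content", "What city is the property in?")]]

def Spec_determine_expected_field (messages : List (List (String × String))) (out : String) : Prop := out = determine_expected_field_alt messages
instance (messages : List (List (String × String))) (out : String) : Decidable (Spec_determine_expected_field messages out) := by unfold Spec_determine_expected_field; infer_instance

-- ===== CLAIM (what is proved, stated in full; the proofs are below) =====
def Claim_equal_determine_expected_field : Prop := ∀ (messages : List (List (String × String))), Dom_determine_expected_field messages → Pre_determine_expected_field messages → Spec_determine_expected_field messages (determine_expected_field messages)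

-- ===== LEMMAS AND PROOFS =====

-- proof-only helpers: the field name of priority i, and the result of an optional hit
def pname (i : Int) : String := (PySem.List.pyGetD fieldPatterns i ("", [])).1
def resOf : Option (Int × String) → String
  | none => "unknown"
  | some ip => pname ip.1

theorem findAssistantRev_eq (ms : List (List (String × String))) :
    findAssistantRev ms =
      ((ms.filter (fun m => PySem.Dict.getD (PySem.Dict.mk m) "role" "" == "assistant")).head?).map
        (fun m => PySem.Str.lower (PySem.Dict.getD (PySem.Dict.mk m) "content" "")) := by
  induction ms with
  | nil => rfl
  | cons m rest ih =>
      by_cases h : (PySem.Dict.getD (PySem.Dict.mk m) "role" "" == "assistant") = true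
      · simp [findAssistantRev, List.filter, h]
      · simp only [Bool.not_eq_true] at h
        simp [findAssistantRev, List.filter, h, ih]

theorem foldl_min_of_le (t : List Int) (a : Int) (h : ∀ y ∈ t, a ≤ y) : t.foldl min a = a := by
  induction t with
  | nil => rfl
  | cons b t ih =>
      simp only [List.foldl_cons, min_eq_left (h b (by simp))]
      exact ih (fun y hy => h y (by simp [hy]))

-- min of a ≤-sorted list is its head
theorem min?_of_pairwise (l : List Int) (h : l.Pairwise (· ≤ ·)) :
    PySem.List.min? l (fun x => x) = l.head? := by
  cases l with
  | nil => rfl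
  | cons a t =>
      rw [PySem.List.min?_id_cons]
      simp only [List.head?_cons, Option.some.injEq]
      rw [List.pairwise_cons] at h
      exact foldl_min_of_le t a h.1

-- the generic step: a group of phrases sharing priority i, followed by the rest
theorem find_group_step (h : String → Bool) (i : Int) (ps : List String) (rest : List (Int × String)) :
    resOf (List.find? (fun ip => h ip.2) (ps.map (fun p => (i, p)) ++ rest)) =
    (if ps.any h then pname i else resOf (List.find? (fun ip => h ip.2) rest)) := by
  induction ps with
  | nil => simp
  | cons p ps ih =>
      simp only [List.map_cons, List.cons_append, List.find?_cons, List.any_cons]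
      by_cases hp : h p = true
      · simp [hp, resOf]
      · rw [Bool.not_eq_true] at hp
        simp only [hp, Bool.false_or]
        exact ih

theorem hits_pairwise (h : String → Bool) :
    ((flatTable.filter (fun ip => h ip.2)).map (·.1)).Pairwise (· ≤ ·) := by
  have hflat : flatTable.Pairwise (fun a b : Int × String => a.1 ≤ b.1) := by decide
  have := hflat.sublist (List.filter_sublist (l := flatTable) (p := fun ip => h ip.2))
  exact (List.pairwise_map).mpr this

-- B's per-message computation, rewritten through head?/find?
theorem alt_msg_eq (msg : String) :
    (if ((flatTable.filter (fun ip => PySem.Str.isIn ip.2 msg)).map (·.1)).isEmpty then "unknown" else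
     match PySem.List.min? ((flatTable.filter (fun ip => PySem.Str.isIn ip.2 msg)).map (·.1)) (fun x => x) with
     | none => "unknown"
     | some i => (PySem.List.pyGetD fieldPatterns i ("", [])).1) =
    resOf (List.find? (fun ip => PySem.Str.isIn ip.2 msg) flatTable) := by
  rw [min?_of_pairwise _ (hits_pairwise (fun p => PySem.Str.isIn p msg))]
  cases hfind : List.find? (fun ip => PySem.Str.isIn ip.2 msg) flatTable with
  | none =>
      have hfe : flatTable.filter (fun ip => PySem.Str.isIn ip.2 msg) = [] := by
        rw [List.filter_eq_nil_iff]
        intro x hx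
        exact List.find?_eq_none.mp hfind x hx
      rw [hfe]
      rfl
  | some ip =>
      have hh : (flatTable.filter (fun ip => PySem.Str.isIn ip.2 msg)).head? = some ip := by
        rw [List.head?_filter]; exact hfind
      have hmap : ((flatTable.filter (fun ip => PySem.Str.isIn ip.2 msg)).map (·.1)).head? = some ip.1 := by
        rw [List.head?_map, hh]; rfl
      have hne : flatTable.filter (fun ip => PySem.Str.isIn ip.2 msg) ≠ [] := by
        intro h; rw [h] at hh; simp at hh
      have hnem : (flatTable.filter (fun ip => PySem.Str.isIn ip.2 msg)).map (·.1) ≠ [] := by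
        rw [Ne, List.map_eq_nil_iff]; exact hne
      rw [List.isEmpty_eq_false_iff.mpr hnem]
      simp only [Bool.false_eq_true, if_false, hmap]
      rfl

theorem flatTable_eq :
    flatTable =
      (["down payment", "put down", "how much can you"].map (fun p => ((0:Int), p)) ++
      (["property price", "price you", "cost of"].map (fun p => ((1:Int), p)) ++
      (["city", "location", "where is", "property location"].map (fun p => ((2:Int), p)) ++
      (["purpose", "property purpose", "use the property"].map (fun p => ((3:Int), p)) ++
      (["passport", "valid passport"].map (fun p => ((4:Int), p)) ++
      (["visa", "u.s. visa", "visa status"].map (fun p => ((5:Int), p)) ++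
      (["income", "documentation", "demonstrate income"].map (fun p => ((6:Int), p)) ++
      (["reserves", "saved", "payments saved"].map (fun p => ((7:Int), p)) ++ [])))))))) := by
  rfl

-- the flat-table find equals A's branch chain
theorem find_flat_eq_chain (msg : String) :
    resOf (List.find? (fun ip => PySem.Str.isIn ip.2 msg) flatTable) =
    (if ["down payment", "put down", "how much can you"].any (fun p => PySem.Str.isIn p msg) then "down_payment"
     else if ["property price", "price you", "cost of"].any (fun p => PySem.Str.isIn p msg) then "property_price"
     else if ["city", "location", "where is", "property location"].any (fun p => PySem.Str.isIn p msg) then "property_location"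
     else if ["purpose", "property purpose", "use the property"].any (fun p => PySem.Str.isIn p msg) then "loan_purpose"
     else if ["passport", "valid passport"].any (fun p => PySem.Str.isIn p msg) then "passport"
     else if ["visa", "u.s. visa", "visa status"].any (fun p => PySem.Str.isIn p msg) then "visa"
     else if ["income", "documentation", "demonstrate income"].any (fun p => PySem.Str.isIn p msg) then "income_documentation"
     else if ["reserves", "saved", "payments saved"].any (fun p => PySem.Str.isIn p msg) then "reserves"
     else "unknown") := by
  rw [flatTable_eq]
  rw [find_group_step (fun s => PySem.Str.isIn s msg), find_group_step (fun s => PySem.Str.isIn s msg),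
      find_group_step (fun s => PySem.Str.isIn s msg), find_group_step (fun s => PySem.Str.isIn s msg),
      find_group_step (fun s => PySem.Str.isIn s msg), find_group_step (fun s => PySem.Str.isIn s msg),
      find_group_step (fun s => PySem.Str.isIn s msg), find_group_step (fun s => PySem.Str.isIn s msg)]
  rfl

-- ===== VERDICT (by name: the statement is the Claim_ definition above) =====
theorem determine_expected_field_spec : Claim_equal_determine_expected_field := by
  intro messages _ _
  unfold Spec_determine_expected_field determine_expected_field determine_expected_field_alt
  rw [findAssistantRev_eq, List.filter_reverse, List.head?_reverse]
  cases hlast : (messages.filter (fun m => PySem.Dict.getD (PySem.Dict.mk m) "role" "" == "assistant")).getLast? with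
  | none =>
      have hfe : messages.filter (fun m => PySem.Dict.getD (PySem.Dict.mk m) "role" "" == "assistant") = [] :=
        List.getLast?_eq_none_iff.mp hlast
      simp [hfe]
  | some last =>
      have hne : messages.filter (fun m => PySem.Dict.getD (PySem.Dict.mk m) "role" "" == "assistant") ≠ [] := by
        intro h; rw [h] at hlast; simp at hlast
      have hmne : messages ≠ [] := by
        intro h; subst h; simp at hne
      have hgetD : PySem.List.pyGetD (messages.filter (fun m => PySem.Dict.getD (PySem.Dict.mk m) "role" "" == "assistant")) (-1) [] = last := by
        rw [PySem.List.pyGetD_neg_one _ _ hne]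
        have := List.getLast?_eq_some_getLast hne
        rw [this] at hlast
        exact (Option.some.injEq _ _).mp hlast
      simp only [List.isEmpty_eq_false_iff.mpr hmne, List.isEmpty_eq_false_iff.mpr hne,
        Bool.false_eq_true, if_false, hgetD, Option.map_some]
      exact ((alt_msg_eq (PySem.Str.lower (PySem.Dict.getD (PySem.Dict.mk last) "content" ""))).trans
        (find_flat_eq_chain _)).symm
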